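-- pv_equiv track=rewrite | github.com/pypi-data/pypi-mirror-309 | packages/myminixform/myminixform-1.0.8-py3-none-any.whl/myminixform.py | csv_externe
-- ===== SOURCE A (Python) =====
-- def csv_externe(my_dict):
--     results = []
--     for key, value in my_dict.items():
--         if isinstance(value, str) and "_(" in value:
--             start_index = value.find("_(") + 2
--             end_index = value.find(")", start_index)
--             if end_index != -1:
--                 text_between_parentheses = value[start_index:end_index]
--                 results.append((key, text_between_parentheses))
--     return results
-- ===== SOURCE B (Python) =====
-- def _extract(value):
--     # single-pass state machine: 0 = scanning, 1 = previous char was '_', 2 = collecting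
--     state = 0
--     buf = []
--     for ch in value:
--         if state == 0:
--             if ch == '_':
--                 state = 1
--         elif state == 1:
--             if ch == '(':
--                 state = 2
--             elif ch != '_':
--                 state = 0
--         else:
--             if ch == ')':
--                 return ''.join(buf)
--             buf.append(ch)
--     return None
--
--
-- def csv_externe(my_dict):
--     return [(key, text) for key, value in my_dict.items()
--             if isinstance(value, str) and (text := _extract(value)) is not None]
-- ===== Notes on version B (the rewrite author's own statement) =====
-- stated objective: alternative
-- what changed: Replaces A's find('_(')+2 / find(')') index arithmetic and slicing with a single left-to-right character state machine that collects the text between '_(' and ')' directly, feeding a list comprehension instead of an append loop.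
import Mathlib
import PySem

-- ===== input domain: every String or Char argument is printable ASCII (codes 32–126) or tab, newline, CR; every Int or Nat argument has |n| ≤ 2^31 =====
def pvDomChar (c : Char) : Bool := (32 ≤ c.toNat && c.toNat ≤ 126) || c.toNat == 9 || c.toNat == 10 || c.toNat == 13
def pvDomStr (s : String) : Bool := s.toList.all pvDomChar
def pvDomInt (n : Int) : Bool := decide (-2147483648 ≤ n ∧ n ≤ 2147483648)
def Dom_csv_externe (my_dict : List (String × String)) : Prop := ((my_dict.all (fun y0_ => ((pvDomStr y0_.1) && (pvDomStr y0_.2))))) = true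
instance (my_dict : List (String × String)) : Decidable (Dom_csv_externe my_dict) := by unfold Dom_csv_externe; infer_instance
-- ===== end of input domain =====

-- B replaces A's find("_(")/find(")")/slice index arithmetic by a single left-to-right
-- character state machine feeding a comprehension (objective: alternative, same cost).

-- ===== PORT A =====
-- literal port of A; `isinstance(value, str)` is always true under the type convention (values are String)
def csv_externe (my_dict : List (String × String)) : List (String × String) :=
  my_dict.foldl (fun results kv =>
    if PySem.Str.isIn "_(" kv.2 then
      let start_index : Int := PySem.Str.find kv.2 "_(" + 2
      let end_index : Int := PySem.Str.findFrom kv.2 ")" start_index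
      if end_index ≠ -1 then
        results ++ [(kv.1, PySem.Str.slice kv.2 (some start_index) (some end_index))]
      else results
    else results) []

-- ===== PORT B =====
-- Source B's `_extract` loop: state 0 = scanning, 1 = previous char was '_', 2 = collecting into buf;
-- the `return` inside the loop becomes the `some buf` branch of the structural recursion
def pvExtractGo : List Char → Int → List Char → Option (List Char)
  | [], _, _ => none
  | ch :: rest, state, buf =>
    if state = 0 then pvExtractGo rest (if ch = '_' then 1 else 0) buf
    else if state = 1 then pvExtractGo rest (if ch = '(' then 2 else if ch ≠ '_' then 0 else 1) buf
    else if ch = ')' then some buf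
    else pvExtractGo rest state (buf ++ [ch])

-- the list comprehension with its walrus filter is a filterMap
def csv_externe_alt (my_dict : List (String × String)) : List (String × String) :=
  my_dict.filterMap (fun kv =>
    match pvExtractGo kv.2.toList 0 [] with
    | some buf => some (kv.1, String.ofList buf)
    | none => none)

-- ===== PRECONDITION & SPEC =====
def Spec_csv_externe (my_dict : List (String × String)) (out : List (String × String)) : Prop := out = csv_externe_alt my_dict
instance (my_dict : List (String × String)) (out : List (String × String)) : Decidable (Spec_csv_externe my_dict out) := by unfold Spec_csv_externe; infer_instance

-- ===== CLAIM (what is proved, stated in full; the proofs are below) =====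
def Claim_equal_csv_externe : Prop := ∀ (my_dict : List (String × String)), Dom_csv_externe my_dict → Spec_csv_externe my_dict (csv_externe my_dict)

-- ===== LEMMAS AND PROOFS =====

-- reference form of the per-value extraction: first "_(" position, then text up to the next ')'
def pvCanon : List Char → Option (List Char)
  | [] => none
  | c :: rest =>
    if c = '_' ∧ rest.head? = some '(' then
      (if ')' ∈ rest.drop 1 then some ((rest.drop 1).takeWhile (· ≠ ')')) else none)
    else pvCanon rest

theorem pvCollect (t : List Char) (buf : List Char) :
    pvExtractGo t 2 buf = if ')' ∈ t then some (buf ++ t.takeWhile (· ≠ ')')) else none := by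
  induction t generalizing buf with
  | nil => simp [pvExtractGo]
  | cons c rest ih =>
    by_cases hc : c = ')'
    · subst hc; simp [pvExtractGo]
    · have hc' : ¬ (')' = c) := fun h => hc h.symm
      simp [pvExtractGo, hc, hc', ih]

theorem pvGoCanon (cs : List Char) :
    pvExtractGo cs 0 [] = pvCanon cs ∧ pvExtractGo cs 1 [] = pvCanon ('_' :: cs) := by
  induction cs with
  | nil => simp [pvExtractGo, pvCanon]
  | cons c rest ih =>
    constructor
    · by_cases hc : c = '_'
      · subst hc
        simpa [pvExtractGo] using ih.2
      · have : pvCanon (c :: rest) = pvCanon rest := by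
          simp [pvCanon, hc]
        simpa [pvExtractGo, hc, this] using ih.1
    · by_cases hc : c = '('
      · subst hc
        simp [pvExtractGo, pvCanon, pvCollect]
      · by_cases hu : c = '_'
        · subst hu
          have : pvCanon ('_' :: '_' :: rest) = pvCanon ('_' :: rest) := by
            simp [pvCanon, hc]
          simpa [pvExtractGo, hc, this] using ih.2
        · have h1 : pvCanon ('_' :: c :: rest) = pvCanon (c :: rest) := by
            simp [pvCanon, hc]
          have h2 : pvCanon (c :: rest) = pvCanon rest := by
            simp [pvCanon, hu]
          simpa [pvExtractGo, hc, hu, h1, h2] using ih.1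

theorem pvPrefixPair (c : Char) (rest : List Char) :
    ['_', '('] <+: (c :: rest) ↔ c = '_' ∧ rest.head? = some '(' := by
  constructor
  · rintro ⟨t, ht⟩
    cases rest with
    | nil => simp at ht
    | cons d u => simp at ht; exact ⟨ht.1.symm, by simp [← ht.2.1]⟩
  · rintro ⟨hc, hh⟩
    cases rest with
    | nil => simp at hh
    | cons d u =>
      simp at hh
      exact ⟨u, by simp [hc, hh]⟩

theorem pvCanonNone (cs : List Char) (h : ¬ ['_', '('] <:+: cs) : pvCanon cs = none := by
  induction cs with
  | nil => simp [pvCanon]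
  | cons c rest ih =>
    have hpre : ¬ (c = '_' ∧ rest.head? = some '(') := by
      intro hc
      exact h ((pvPrefixPair c rest).mpr hc).isInfix
    rw [pvCanon, if_neg hpre]
    exact ih (fun hinf => h (List.infix_cons hinf))

theorem pvCanonAt (cs : List Char) (f : Nat)
    (h1 : ['_', '('] <+: cs.drop f) (h2 : ∀ i < f, ¬ ['_', '('] <+: cs.drop i) :
    pvCanon cs = if ')' ∈ cs.drop (f + 2) then some ((cs.drop (f + 2)).takeWhile (· ≠ ')')) else none := by
  induction cs generalizing f with
  | nil => simp at h1
  | cons c rest ih =>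
    cases f with
    | zero =>
      simp only [List.drop_zero] at h1
      have hc := (pvPrefixPair c rest).mp h1
      rw [pvCanon, if_pos hc]
      simp
    | succ f' =>
      have h0 : ¬ (c = '_' ∧ rest.head? = some '(') := by
        intro hc
        exact h2 0 (Nat.succ_pos _) (by simpa using (pvPrefixPair c rest).mpr hc)
      rw [pvCanon, if_neg h0]
      have := ih f' (by simpa using h1) (fun i hi => by
        have := h2 (i + 1) (by omega)
        simpa using this)
      simpa using this

theorem pvTakeWhileEq (xs : List Char) (n : Nat)
    (h1 : xs[n]? = some ')') (h2 : ∀ i < n, xs[i]? ≠ some ')') :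
    xs.takeWhile (· ≠ ')') = xs.take n := by
  induction xs generalizing n with
  | nil => simp at h1
  | cons c rest ih =>
    cases n with
    | zero =>
      simp at h1
      simp [List.takeWhile, h1]
    | succ m =>
      have hc : c ≠ ')' := by
        have := h2 0 (Nat.succ_pos _)
        simpa using this
      simp only [List.getElem?_cons_succ] at h1
      rw [List.take_succ_cons, List.takeWhile_cons_of_pos (by simpa using hc)]
      rw [ih m h1 (fun i hi => by
        have := h2 (i + 1) (by omega)
        simpa using this)]

-- per-value agreement between B's state machine and A's find/slice arithmetic
theorem pvPerValue (s : String) :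
    (match pvExtractGo s.toList 0 [] with
      | some buf => some (String.ofList buf)
      | none => none) =
    (if PySem.Str.isIn "_(" s then
      (if PySem.Str.findFrom s ")" (PySem.Str.find s "_(" + 2) ≠ -1 then
        some (PySem.Str.slice s (some (PySem.Str.find s "_(" + 2))
          (some (PySem.Str.findFrom s ")" (PySem.Str.find s "_(" + 2))))
      else none)
    else none) := by
  have hgo := (pvGoCanon s.toList).1
  by_cases hin : ['_', '('] <:+: s.toList
  case neg =>
    have hIn : PySem.Str.isIn "_(" s = false := by
      rw [PySem.Str.isIn_eq]
      exact (PySem.Chars.isIn_eq_false_iff _ _).mpr (by simpa using hin)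
    rw [hgo, pvCanonNone s.toList hin, hIn]
    simp
  case pos =>
    have hIn : PySem.Str.isIn "_(" s = true := by
      rw [PySem.Str.isIn_eq]
      exact (PySem.Chars.isIn_iff_infix _ _).mpr (by simpa using hin)
    have hnn : 0 ≤ PySem.Chars.find s.toList "_(".toList :=
      (PySem.Chars.find_nonneg_iff _ _).mpr (by simpa using hin)
    obtain ⟨hp, hmin⟩ := PySem.Chars.find_spec hnn
    set n : Nat := (PySem.Chars.find s.toList "_(".toList).toNat with hn
    have hfind : PySem.Str.find s "_(" = (n : Int) := by
      rw [PySem.Str.find_eq]; omega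
    have hlen2 : 2 ≤ (s.toList.drop n).length := hp.length_le
    have hle : n + 2 ≤ s.toList.length := by
      rw [List.length_drop] at hlen2; omega
    have hstart : PySem.Str.find s "_(" + 2 = ((n + 2 : Nat) : Int) := by
      rw [hfind]; push_cast; ring
    have hff : PySem.Str.findFrom s ")" (PySem.Str.find s "_(" + 2) =
        (if PySem.Chars.find (s.toList.drop (n + 2)) ")".toList = -1 then -1
         else ((n + 2 : Nat) : Int) + PySem.Chars.find (s.toList.drop (n + 2)) ")".toList) := by
      rw [PySem.Str.findFrom_eq, hstart]
      exact PySem.Chars.findFrom_natCast s.toList ")".toList (n + 2) hle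
    have hCanon := pvCanonAt s.toList n (by simpa using hp)
      (fun i hi => by have := hmin i hi; simpa using this)
    by_cases hg : PySem.Chars.find (s.toList.drop (n + 2)) ")".toList = -1
    · -- no ')' after "_(": both skip
      have hmem : ')' ∉ s.toList.drop (n + 2) := by
        have := (PySem.Chars.find_eq_neg_one_iff _ _).mp (by simpa using hg)
        intro hm
        exact this (by simpa using (List.singleton_infix_iff ')' _).mpr hm)
      rw [hgo, hCanon, if_neg hmem, hIn, hff, if_pos hg]
      simp
    · have hgnn : 0 ≤ PySem.Chars.find (s.toList.drop (n + 2)) ")".toList := by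
        have := PySem.Chars.neg_one_le_find (s.toList.drop (n + 2)) ")".toList
        omega
      obtain ⟨hp2, hmin2⟩ := PySem.Chars.find_spec hgnn
      set g : Nat := (PySem.Chars.find (s.toList.drop (n + 2)) ")".toList).toNat with hgdef
      have hgval : PySem.Chars.find (s.toList.drop (n + 2)) ")".toList = (g : Int) := by omega
      have hmem : ')' ∈ s.toList.drop (n + 2) := by
        have : [')'] <+: (s.toList.drop (n + 2)).drop g := by simpa using hp2
        exact List.mem_of_mem_drop (this.subset (by simp))
      -- turn find's spec into getElem? facts for pvTakeWhileEq
      have hget : (s.toList.drop (n + 2))[g]? = some ')' := by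
        have : [')'] <+: (s.toList.drop (n + 2)).drop g := by simpa using hp2
        obtain ⟨t, ht⟩ := this
        have := congrArg List.head? ht
        simpa [List.head?_drop] using this.symm
      have hget2 : ∀ i < g, (s.toList.drop (n + 2))[i]? ≠ some ')' := by
        intro i hi hc
        have hpre : [')'] <+: (s.toList.drop (n + 2)).drop i := by
          have hh : ((s.toList.drop (n + 2)).drop i).head? = some ')' := by
            simpa [List.head?_drop] using hc
          cases hdd : (s.toList.drop (n + 2)).drop i with
          | nil => rw [hdd] at hh; simp at hh
          | cons d u =>
            rw [hdd] at hh; simp at hh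
            exact ⟨u, by simp [hh]⟩
        exact hmin2 i hi (by simpa using hpre)
      have htw := pvTakeWhileEq (s.toList.drop (n + 2)) g hget hget2
      have hne : ((n + 2 : Nat) : Int) + (g : Int) ≠ -1 := by omega
      have hslice : PySem.Str.slice s (some (PySem.Str.find s "_(" + 2))
          (some (((n + 2 : Nat) : Int) + (g : Int))) =
          String.ofList ((s.toList.drop (n + 2)).take g) := by
        unfold PySem.Str.slice
        rw [hstart]
        congr 1
        rw [PySem.Chars.slice_eq_listSlice]
        rw [PySem.List.slice_toNat s.toList (by positivity) (by positivity)]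
        congr 1
        omega
      rw [hgo, hCanon, if_pos hmem, hIn, hff, if_neg hg, hgval, if_pos hne, htw, hslice]
      simp

-- lift the per-value agreement through A's foldl / B's filterMap
theorem pvFoldl (l : List (String × String)) (acc : List (String × String)) :
    l.foldl (fun results kv =>
      if PySem.Str.isIn "_(" kv.2 then
        let start_index : Int := PySem.Str.find kv.2 "_(" + 2
        let end_index : Int := PySem.Str.findFrom kv.2 ")" start_index
        if end_index ≠ -1 then
          results ++ [(kv.1, PySem.Str.slice kv.2 (some start_index) (some end_index))]
        else results
      else results) acc =
    acc ++ l.filterMap (fun kv =>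
      match pvExtractGo kv.2.toList 0 [] with
      | some buf => some (kv.1, String.ofList buf)
      | none => none) := by
  induction l generalizing acc with
  | nil => simp
  | cons kv rest ih =>
    have h := pvPerValue kv.2
    simp only [List.foldl_cons, List.filterMap_cons]
    by_cases hin : PySem.Str.isIn "_(" kv.2 = true
    · rw [if_pos hin] at h ⊢
      by_cases hend : PySem.Str.findFrom kv.2 ")" (PySem.Str.find kv.2 "_(" + 2) ≠ -1
      · rw [if_pos hend] at h ⊢
        cases hgo : pvExtractGo kv.2.toList 0 [] with
        | none => rw [hgo] at h; simp at h
        | some buf =>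
          rw [hgo] at h
          simp only [Option.some.injEq] at h
          rw [ih]
          simp [h]
      · rw [if_neg hend] at h ⊢
        cases hgo : pvExtractGo kv.2.toList 0 [] with
        | none => rw [hgo] at h; rw [ih]
        | some buf => rw [hgo] at h; simp at h
    · rw [if_neg hin] at h ⊢
      cases hgo : pvExtractGo kv.2.toList 0 [] with
      | none => rw [hgo] at h; rw [ih]
      | some buf => rw [hgo] at h; simp at h

-- ===== VERDICT (by name: the statement is the Claim_ definition above) =====
theorem csv_externe_spec : Claim_equal_csv_externe := by
  intro my_dict _
  unfold Spec_csv_externe csv_externe csv_externe_alt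
  simpa using pvFoldl my_dict []
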